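-- pv_equiv track=rewrite | github.com/krzyssikora/advent_of_code | aoc_2023/05_seeds.py | get_mapping_binary
-- ===== SOURCE A (Python) =====
-- def get_mapping_binary(location: int, single_map: list, start: int, end: int) -> int:
--     if start > end:
--         return location
--     if start == end:
--         if single_map[end][0] <= location < single_map[end][1]:
--             return location + single_map[end][2]
--         else:
--             return location
--     middle = (start + end) // 2
--     mapping = single_map[middle]
--
--     if mapping[0] <= location < mapping[1]:
--         return location + mapping[2]
--     if location < mapping[0]:
--         if middle == 0:
--             return location
--         else:
--             return get_mapping_binary(location, single_map, start, middle - 1)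
--     if mapping[1] <= location:
--         return get_mapping_binary(location, single_map, middle + 1, end)
--     return location
-- ===== SOURCE B (Python) =====
-- def get_mapping_binary(location: int, single_map: list, start: int, end: int) -> int:
--     if start > end:
--         return location
--     window = single_map[start:end + 1]
--     while window:
--         m = (len(window) - 1) // 2
--         a, b, offset = window[m]
--         if a <= location < b:
--             return location + offset
--         window = window[:m] if location < a else window[m + 1:]
--     return location
-- ===== Notes on version B (the rewrite author's own statement) =====
-- stated objective: alternative
-- what changed: Replaced the recursive index-window binary search by a loop that slices the list once and then repeatedly shrinks the window list itself (take/drop around the midpoint), so no start/end index arithmetic or recursion remains.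
-- outside the precondition, e.g. on get_mapping_binary(5, [(0, 10, 100)], -1, -1): A returns 105, B returns 5; on get_mapping_binary(9, [(12, 14, 5)], 0, 6): A raises IndexError, B returns 9
import Mathlib
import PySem

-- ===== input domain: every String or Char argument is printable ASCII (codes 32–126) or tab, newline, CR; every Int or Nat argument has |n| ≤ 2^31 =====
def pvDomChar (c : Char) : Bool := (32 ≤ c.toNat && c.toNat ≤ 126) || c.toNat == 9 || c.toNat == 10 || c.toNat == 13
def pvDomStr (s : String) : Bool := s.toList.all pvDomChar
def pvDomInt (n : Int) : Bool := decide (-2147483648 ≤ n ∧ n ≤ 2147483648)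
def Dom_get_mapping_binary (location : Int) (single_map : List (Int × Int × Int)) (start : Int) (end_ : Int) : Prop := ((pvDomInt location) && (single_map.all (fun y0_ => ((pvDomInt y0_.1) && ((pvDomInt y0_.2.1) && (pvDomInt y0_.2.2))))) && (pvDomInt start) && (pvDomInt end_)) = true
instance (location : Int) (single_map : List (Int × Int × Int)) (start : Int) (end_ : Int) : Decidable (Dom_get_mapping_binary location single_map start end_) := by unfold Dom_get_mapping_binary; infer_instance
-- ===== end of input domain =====

-- B slices the searched window out of the list once and then binary-searches by shrinking
-- that window list itself with take/drop (objective: alternative decomposition, no index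
-- arithmetic); equivalence is about the return value.

-- ===== PORT A =====
-- literal port of A's recursion, made total by a sufficient fuel (the window size); the
-- `none` branch of pyGet? is a Python IndexError and lies outside Pre_get_mapping_binary
-- (the port returns 0 there, a value never claimed about).
def gmbA (location : Int) (single_map : List (Int × Int × Int)) (start end_ : Int) : Nat → Int
  | 0 => 0    -- never reached: the initial fuel exceeds the window size
  | fuel + 1 =>
    if start > end_ then location
    else if start = end_ then
      match PySem.List.pyGet? single_map end_ with
      | none => 0
      | some m => if m.1 ≤ location ∧ location < m.2.1 then location + m.2.2 else location
    else
      let middle := PySem.Int.floordiv (start + end_) 2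
      match PySem.List.pyGet? single_map middle with
      | none => 0
      | some m =>
        if m.1 ≤ location ∧ location < m.2.1 then location + m.2.2
        else if location < m.1 then
          (if middle = 0 then location
           else gmbA location single_map start (middle - 1) fuel)
        else if m.2.1 ≤ location then gmbA location single_map (middle + 1) end_ fuel
        else location

def get_mapping_binary (location : Int) (single_map : List (Int × Int × Int)) (start : Int) (end_ : Int) : Int :=
  gmbA location single_map start end_ ((end_ - start + 1).toNat + 1)

-- ===== PORT B =====
-- the while-loop of Source B: the state is the window LIST itself, shrunk by take/drop;
-- structural termination on its length, no fuel, no indices.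
def gmbWin (location : Int) (window : List (Int × Int × Int)) : Int :=
  if hw : window = [] then location
  else
    have hlen : window.length ≠ 0 := by simp [hw]
    have hm : (window.length - 1) / 2 < window.length := by omega
    let p := window[(window.length - 1) / 2]'hm
    if p.1 ≤ location ∧ location < p.2.1 then location + p.2.2
    else if location < p.1 then gmbWin location (window.take ((window.length - 1) / 2))
    else gmbWin location (window.drop ((window.length - 1) / 2 + 1))
termination_by window.length
decreasing_by
  · simp [List.length_take]; omega
  · simp [List.length_drop]; omega

def get_mapping_binary_alt (location : Int) (single_map : List (Int × Int × Int)) (start : Int) (end_ : Int) : Int :=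
  if start > end_ then location
  else gmbWin location (PySem.List.slice single_map (some start) (some (end_ + 1)))

-- ===== PRECONDITION & SPEC =====
-- Pre_ restricts to the natural binary-search domain: an empty window (start > end_, no
-- indexing happens), a window whose indices lie inside the list, or an all-negative window
-- that Python's uniform negative-index rule maps to in-range indices (end_ ≤ -2: for
-- end_ = -1 the stop bound end_+1 = 0 of B's slice is absolute, not from-the-end).
-- Outside it A either raises IndexError or mixes wrapped and plain indices accidentally (see cites).
def Pre_get_mapping_binary (location : Int) (single_map : List (Int × Int × Int)) (start : Int) (end_ : Int) : Prop :=
  start > end_ ∨ (0 ≤ start ∧ end_ < single_map.length)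
    ∨ (-(single_map.length : Int) ≤ start ∧ start ≤ end_ ∧ end_ ≤ -2)
instance (location : Int) (single_map : List (Int × Int × Int)) (start : Int) (end_ : Int) : Decidable (Pre_get_mapping_binary location single_map start end_) := by unfold Pre_get_mapping_binary; infer_instance

def pvWitness_get_mapping_binary : Int × (List (Int × Int × Int)) × Int × Int := (5, [(0, 10, 100), (20, 30, -7)], 0, 1)

def Spec_get_mapping_binary (location : Int) (single_map : List (Int × Int × Int)) (start : Int) (end_ : Int) (out : Int) : Prop := out = get_mapping_binary_alt location single_map start end_
instance (location : Int) (single_map : List (Int × Int × Int)) (start : Int) (end_ : Int) (out : Int) : Decidable (Spec_get_mapping_binary location single_map start end_ out) := by unfold Spec_get_mapping_binary; infer_instance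

-- ===== CLAIM (what is proved, stated in full; the proofs are below) =====
def Claim_equal_get_mapping_binary : Prop := ∀ (location : Int) (single_map : List (Int × Int × Int)) (start : Int) (end_ : Int), Dom_get_mapping_binary location single_map start end_ → Pre_get_mapping_binary location single_map start end_ → Spec_get_mapping_binary location single_map start end_ (get_mapping_binary location single_map start end_)

-- ===== LEMMAS AND PROOFS =====

theorem pyGet?_shift (xs : List (Int × Int × Int)) (i : Int)
    (h1 : -(xs.length : Int) ≤ i) (h2 : i < 0) :
    PySem.List.pyGet? xs i = PySem.List.pyGet? xs (i + xs.length) := by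
  simp only [PySem.List.pyGet?, PySem.List.pyIdx?]
  split_ifs <;> try (first | rfl | omega)
  have hk : xs.length - (-i).toNat = (i + xs.length).toNat := by omega
  rw [hk]

theorem gmbA_gt (location : Int) (single_map : List (Int × Int × Int)) (s e : Int)
    (fa : Nat) (hf : 0 < fa) (h : s > e) : gmbA location single_map s e fa = location := by
  cases fa with
  | zero => omega
  | succ n => simp [gmbA, h]

-- A on an all-negative index window behaves exactly as on the wrapped (shifted) window
theorem gmbA_shift (location : Int) (single_map : List (Int × Int × Int)) :
    ∀ (fa : Nat) (start end_ : Int),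
      (end_ - start + 1).toNat < fa →
      -(single_map.length : Int) ≤ start → start ≤ end_ → end_ ≤ -1 →
      gmbA location single_map start end_ fa
        = gmbA location single_map (start + single_map.length) (end_ + single_map.length) fa := by
  intro fa
  induction fa with
  | zero => intro start end_ hfa h1 h2 h3; omega
  | succ fa ih =>
    intro start end_ hfa h1 h2 h3
    have hgt : ¬ start > end_ := by omega
    have hgt' : ¬ start + (single_map.length : Int) > end_ + single_map.length := by omega
    by_cases heq : start = end_
    · have heq' : start + (single_map.length : Int) = end_ + single_map.length := by omega
      simp only [gmbA, if_neg hgt, if_neg hgt', if_pos heq, if_pos heq',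
        pyGet?_shift single_map end_ (by omega) (by omega)]
    · have heq' : ¬ start + (single_map.length : Int) = end_ + single_map.length := by omega
      have hmid := PySem.Int.floordiv_two_mid_bounds (lo := start) (hi := end_) h2
      set mid := PySem.Int.floordiv (start + end_) 2 with hmiddef
      have hmidlt : mid < end_ := by
        rw [hmiddef, PySem.Int.floordiv_eq_ediv_of_pos (by omega)]
        omega
      have hmid' : PySem.Int.floordiv ((start + (single_map.length : Int)) + (end_ + single_map.length)) 2
          = mid + single_map.length := by
        rw [hmiddef, PySem.Int.floordiv_eq_ediv_of_pos (by omega),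
          PySem.Int.floordiv_eq_ediv_of_pos (by omega)]
        omega
      have hmne : ¬ mid = 0 := by omega
      simp only [gmbA, if_neg hgt, if_neg hgt', if_neg heq, if_neg heq', hmid', ← hmiddef,
        pyGet?_shift single_map mid (by omega) (by omega)]
      cases hg : PySem.List.pyGet? single_map (mid + single_map.length) with
      | none => rfl
      | some p =>
        obtain ⟨a, b, off⟩ := p
        by_cases hc1 : a ≤ location ∧ location < b
        · simp [hc1]
        · simp only [if_neg hc1]
          by_cases hc2 : location < a
          · simp only [if_pos hc2, if_neg hmne]
            by_cases h0' : mid + (single_map.length : Int) = 0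
            · rw [if_pos h0', gmbA_gt location single_map start (mid - 1) fa (by omega) (by omega)]
            · rw [if_neg h0']
              by_cases hms : mid = start
              · rw [gmbA_gt location single_map start (mid - 1) fa (by omega) (by omega),
                  gmbA_gt location single_map (start + single_map.length)
                    (mid + (single_map.length : Int) - 1) fa (by omega) (by omega)]
              · rw [ih start (mid - 1) (by omega) (by omega) (by omega) (by omega),
                  show mid - 1 + (single_map.length : Int) = mid + single_map.length - 1 by ring]
          · simp only [if_neg hc2]
            by_cases hc3 : b ≤ location
            · simp only [if_pos hc3]
              rw [ih (mid + 1) end_ (by omega) (by omega) (by omega) (by omega),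
                show mid + 1 + (single_map.length : Int) = mid + single_map.length + 1 by ring]
            · rw [if_neg hc3, if_neg hc3]

theorem gmbWin_nil (location : Int) : gmbWin location [] = location := by
  rw [gmbWin]; simp

-- main equivalence: A on the index window [start, end_] equals B's loop on the window list
theorem gmbA_eq_gmbWin (location : Int) (single_map : List (Int × Int × Int)) :
    ∀ (fa : Nat) (start end_ : Int),
      (end_ - start + 1).toNat < fa →
      0 ≤ start → end_ < single_map.length →
      gmbA location single_map start end_ fa
        = gmbWin location ((single_map.drop start.toNat).take (end_ - start + 1).toNat) := by
  intro fa
  induction fa with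
  | zero => intro start end_ h; omega
  | succ fa ih =>
    intro start end_ hfa hs he
    by_cases hgt : start > end_
    · have h0 : (end_ - start + 1).toNat = 0 := by omega
      simp [gmbA, hgt, h0, gmbWin_nil]
    · set L := (end_ - start + 1).toNat with hL
      have hL1 : 1 ≤ L := by omega
      set w := (single_map.drop start.toNat).take L with hw
      have hwlen : w.length = L := by
        simp only [hw, List.length_take, List.length_drop]
        omega
      have hwne : w ≠ [] := by
        intro h; rw [h] at hwlen; simp at hwlen; omega
      set m := (L - 1) / 2 with hm
      have hmL : m < L := by omega
      have hsm : start.toNat + m < single_map.length := by omega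
      have hgetm : w[m]'(by omega) = single_map[start.toNat + m]'hsm := by
        simp only [hw, List.getElem_take, List.getElem_drop]
      have hmidv : PySem.Int.floordiv (start + end_) 2 = start + (m : Int) := by
        rw [PySem.Int.floordiv_eq_ediv_of_pos (by omega)]
        omega
      have hidx : (start + (m : Int)).toNat = start.toNat + m := by omega
      have hAidx : PySem.List.pyGet? single_map (start + (m : Int))
          = some (single_map[start.toNat + m]'hsm) := by
        rw [PySem.List.pyGet?_eq_some_getElem single_map (by omega) (by omega)]
        simp [hidx]
      rw [gmbWin, dif_neg hwne]
      simp only [hwlen, ← hm, hgetm]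
      set p := single_map[start.toNat + m]'hsm with hp
      clear_value p
      obtain ⟨a, b, off⟩ := p
      by_cases heq : start = end_
      · -- single-element window: L = 1, m = 0
        have hLe : L = 1 := by omega
        have hme : m = 0 := by omega
        have hEidx : PySem.List.pyGet? single_map end_ = some (a, b, off) := by
          rw [show end_ = start + (m : Int) by omega]
          exact hAidx
        simp only [gmbA, if_neg (by omega : ¬ start > end_), if_pos heq, hEidx]
        by_cases h1 : a ≤ location ∧ location < b
        · simp [h1]
        · have ht : w.take m = [] := by
            rw [List.eq_nil_iff_length_eq_zero]
            simp [hme]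
          have hd : w.drop (m + 1) = [] := by
            rw [List.eq_nil_iff_length_eq_zero]
            simp [hwlen, hme, hLe]
          simp only [if_neg h1]
          by_cases h2 : location < a
          · simp [h2, ht, gmbWin_nil]
          · simp [h2, hd, gmbWin_nil]
      · -- start < end_
        have hlt : start < end_ := by omega
        simp only [gmbA, if_neg (by omega : ¬ start > end_), if_neg heq, hmidv, hAidx]
        by_cases h1 : a ≤ location ∧ location < b
        · simp [h1]
        · simp only [if_neg h1]
          by_cases h2 : location < a
          · -- go left: A recurses on (start, middle - 1), B on w.take m
            have hwt : w.take m = (single_map.drop start.toNat).take ((start + (m : Int) - 1) - start + 1).toNat := by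
              rw [hw, List.take_take]
              congr 1
              omega
            simp only [if_pos h2]
            by_cases h0 : start + (m : Int) = 0
            · have hm0 : w.take m = [] := by
                rw [List.eq_nil_iff_length_eq_zero]
                simp [List.length_take, hwlen]
                omega
              rw [if_pos h0, hm0, gmbWin_nil]
            · rw [if_neg h0, ih start (start + (m : Int) - 1) (by omega) hs (by omega), ← hwt]
          · simp only [if_neg h2]
            have h3 : b ≤ location := by omega
            have hwd : w.drop (m + 1)
                = (single_map.drop (start + (m : Int) + 1).toNat).take (end_ - (start + (m : Int) + 1) + 1).toNat := by
              rw [hw, List.drop_take, List.drop_drop]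
              congr 1
              · omega
              · congr 1
                omega
            rw [if_pos h3, ih (start + (m : Int) + 1) end_ (by omega) (by omega) he, ← hwd]

-- ===== VERDICT (by name: the statement is the Claim_ definition above) =====
theorem get_mapping_binary_spec : Claim_equal_get_mapping_binary := by
  intro location single_map start end_ _hdom hpre
  unfold Spec_get_mapping_binary get_mapping_binary get_mapping_binary_alt
  by_cases hgt : start > end_
  · simp [gmbA, hgt]
  rcases hpre with hgt' | ⟨hs, he⟩ | ⟨hnl, hse, hneg⟩
  · exact absurd hgt' hgt
  · rw [if_neg hgt]
    have h1 : ((start.toNat : Nat) : Int) = start := Int.toNat_of_nonneg hs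
    have h2 : (((end_ + 1).toNat : Nat) : Int) = end_ + 1 := Int.toNat_of_nonneg (by omega)
    have hslice : PySem.List.slice single_map (some start) (some (end_ + 1))
        = (single_map.drop start.toNat).take (end_ - start + 1).toNat := by
      rw [← h1, ← h2, PySem.List.slice_natCast]
      congr 1
      omega
    rw [hslice]
    exact gmbA_eq_gmbWin location single_map _ start end_ (by omega) hs he
  · rw [if_neg hgt]
    have hslice2 : PySem.List.slice single_map (some start) (some (end_ + 1))
        = (single_map.drop (start + (single_map.length : Int)).toNat).take (end_ - start + 1).toNat := by
      simp only [PySem.List.slice, PySem.List.clampIdx]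
      split_ifs <;> try omega
      congr 1
      · omega
      · congr 1
        omega
    rw [hslice2, gmbA_shift location single_map _ start end_ (by omega) hnl hse (by omega)]
    have := gmbA_eq_gmbWin location single_map ((end_ - start + 1).toNat + 1)
      (start + single_map.length) (end_ + single_map.length) (by omega) (by omega) (by omega)
    rw [show (end_ + (single_map.length : Int)) - (start + single_map.length) + 1 = end_ - start + 1 by ring] at this
    exact this
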